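-- pv_equiv track=rewrite | github.com/philipwilsonTHG/psh | psh/composite_processor.py | _mark_quoted_globs
-- ===== SOURCE A (Python) =====
-- def _mark_quoted_globs(value: str) -> str:
--     """Mark glob characters in quoted strings with \\x00 prefix.
--
--     Skips characters inside ${...} expansions since those are
--     part of variable syntax, not glob patterns.
--     """
--     result = []
--     i = 0
--     brace_depth = 0
--     while i < len(value):
--         ch = value[i]
--         if ch == '$' and i + 1 < len(value) and value[i + 1] == '{':
--             result.append('${')
--             brace_depth += 1
--             i += 2
--             continue
--         if ch == '}' and brace_depth > 0:
--             brace_depth -= 1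
--             result.append('}')
--             i += 1
--             continue
--         if brace_depth == 0 and ch in ('*', '?', '['):
--             result.append(f'\x00{ch}')
--         else:
--             result.append(ch)
--         i += 1
--     return ''.join(result)
-- ===== SOURCE B (Python) =====
-- def _mark_quoted_globs(value: str) -> str:
--     """Mark unquoted glob chars with \x00, copying ${...} regions verbatim.
--
--     Instead of a fused state machine with a brace-depth counter, the top-level
--     loop only handles depth 0; a recursive-descent helper skips a whole
--     ${...} region (nesting handled by recursion), which is copied as a slice.
--     """
--     n = len(value)
--
--     def skip_braced(i: int) -> int:
--         # value was at '${' just before i; return the index just past the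
--         # matching '}' (or n if unterminated).
--         while i < n:
--             ch = value[i]
--             if ch == '}':
--                 return i + 1
--             if ch == '$' and i + 1 < n and value[i + 1] == '{':
--                 i = skip_braced(i + 2)
--             else:
--                 i += 1
--         return n
--
--     out = []
--     i = 0
--     while i < n:
--         ch = value[i]
--         if ch == '$' and i + 1 < n and value[i + 1] == '{':
--             j = skip_braced(i + 2)
--             out.append(value[i:j])
--             i = j
--         elif ch in '*?[':
--             out.append('\x00' + ch)
--             i += 1
--         else:
--             out.append(ch)
--             i += 1
--     return ''.join(out)
-- ===== Notes on version B (the rewrite author's own statement) =====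
-- stated objective: alternative
-- what changed: Replaces A's fused single-loop state machine with an integer brace-depth counter by a two-level design: a recursive-descent helper that skips a whole ${...} region (nesting handled by recursion, no counter) and copies it verbatim as one slice, plus a flat top-level loop that only marks glob chars at depth 0.
import Mathlib
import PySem

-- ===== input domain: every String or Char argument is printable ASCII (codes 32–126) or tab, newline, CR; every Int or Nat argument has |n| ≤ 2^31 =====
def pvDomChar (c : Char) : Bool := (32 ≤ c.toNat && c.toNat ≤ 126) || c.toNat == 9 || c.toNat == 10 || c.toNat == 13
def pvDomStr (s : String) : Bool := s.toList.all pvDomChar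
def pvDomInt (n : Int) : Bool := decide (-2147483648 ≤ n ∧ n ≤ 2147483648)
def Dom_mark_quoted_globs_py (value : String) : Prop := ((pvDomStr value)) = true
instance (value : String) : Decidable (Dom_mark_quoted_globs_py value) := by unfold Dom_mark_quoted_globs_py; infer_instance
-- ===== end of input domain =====

-- B replaces A's fused counter state machine by a recursive-descent skipper that
-- copies each ${...} region verbatim plus a flat depth-0 marking loop (objective: alternative).

-- ===== PORT A =====
-- A's while loop over index i with state brace_depth, as structural recursion
-- over the remaining characters; lookahead value[i+1] = rest.head?.
def markGlobsA : List Char → Int → List Char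
  | [], _ => []
  | c :: rest, depth =>
    if c = '$' ∧ rest.head? = some '{' then
      '$' :: '{' :: markGlobsA rest.tail (depth + 1)
    else if c = '}' ∧ depth > 0 then
      '}' :: markGlobsA rest (depth - 1)
    else if depth = 0 ∧ (c = '*' ∨ c = '?' ∨ c = '[') then
      '\x00' :: c :: markGlobsA rest depth
    else
      c :: markGlobsA rest depth
  termination_by l _ => l.length
  decreasing_by all_goals (simp [List.length_tail]; try omega)

def mark_quoted_globs_py (value : String) : String :=
  String.ofList (markGlobsA value.toList 0)

-- ===== PORT B =====
-- B's skip_braced: consume up to and including the matching '}' (nested '${'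
-- handled by recursion), returning (consumed chars, rest).  The Python helper
-- returns an end index and the caller slices; over lists the consumed prefix
-- IS that slice.  Fuel (initial list length) only makes the nested recursion
-- structurally total; it never runs out.
def skipBracedB : Nat → List Char → List Char × List Char
  | 0, l => ([], l)
  | _ + 1, [] => ([], [])
  | f + 1, c :: rest =>
    if c = '}' then (['}'], rest)
    else if c = '$' ∧ rest.head? = some '{' then
      let p := skipBracedB f rest.tail
      let q := skipBracedB f p.2
      ('$' :: '{' :: (p.1 ++ q.1), q.2)
    else
      let p := skipBracedB f rest
      (c :: p.1, p.2)

theorem skipBracedB_len : ∀ (f : Nat) (l : List Char), (skipBracedB f l).2.length ≤ l.length := by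
  intro f
  induction f with
  | zero => intro l; simp [skipBracedB]
  | succ f ih =>
    intro l
    cases l with
    | nil => simp [skipBracedB]
    | cons c rest =>
      simp only [skipBracedB]
      split
      · simp
      · split
        · have h1 := ih rest.tail
          have h2 := ih (skipBracedB f rest.tail).2
          simp only [List.length_tail, List.length_cons] at *
          omega
        · have := ih rest
          simp only [List.length_cons]
          omega

-- B's top-level loop: marks globs at depth 0, copies ${...} regions via skipBracedB.
def markGlobsB : List Char → List Char
  | [] => []
  | c :: rest =>
    if c = '$' ∧ rest.head? = some '{' then
      let p := skipBracedB rest.tail.length rest.tail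
      '$' :: '{' :: (p.1 ++ markGlobsB p.2)
    else if c = '*' ∨ c = '?' ∨ c = '[' then
      '\x00' :: c :: markGlobsB rest
    else
      c :: markGlobsB rest
  termination_by l => l.length
  decreasing_by all_goals
    (have h := skipBracedB_len rest.tail.length rest.tail
     simp only [List.length_tail, List.length_cons] at h ⊢
     omega)

def mark_quoted_globs_py_alt (value : String) : String :=
  String.ofList (markGlobsB value.toList)

-- ===== PRECONDITION & SPEC =====
def Spec_mark_quoted_globs_py (value : String) (out : String) : Prop := out = mark_quoted_globs_py_alt value
instance (value : String) (out : String) : Decidable (Spec_mark_quoted_globs_py value out) := by unfold Spec_mark_quoted_globs_py; infer_instance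

-- ===== CLAIM (what is proved, stated in full; the proofs are below) =====
def Claim_equal_mark_quoted_globs_py : Prop := ∀ (value : String), Dom_mark_quoted_globs_py value → Spec_mark_quoted_globs_py value (mark_quoted_globs_py value)

-- ===== LEMMAS AND PROOFS =====

-- Inside a ${...} region (depth ≥ 1), A copies verbatim until the matching '}',
-- then continues one level up: exactly what skipBracedB consumes.
theorem markGlobsA_skip : ∀ (f : Nat) (l : List Char) (d : Int), l.length ≤ f → 1 ≤ d →
    markGlobsA l d = (skipBracedB f l).1 ++ markGlobsA (skipBracedB f l).2 (d - 1) := by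
  intro f
  induction f with
  | zero =>
    intro l d hl _
    have : l = [] := List.eq_nil_of_length_eq_zero (Nat.le_zero.mp hl)
    subst this; simp [skipBracedB, markGlobsA]
  | succ f ih =>
    intro l d hl hd
    cases l with
    | nil => simp [skipBracedB, markGlobsA]
    | cons c rest =>
      by_cases hbr : c = '}'
      · subst hbr
        have hne : ¬ (('}' : Char) = '$' ∧ rest.head? = some '{') := by simp
        rw [markGlobsA, skipBracedB]
        rw [if_neg hne, if_pos ⟨rfl, by omega⟩, if_pos rfl]
        simp
      · by_cases hdl : c = '$' ∧ rest.head? = some '{'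
        · rw [markGlobsA, skipBracedB]
          simp only [if_pos hdl, if_neg hbr]
          have hlen : rest.tail.length ≤ f := by
            simp only [List.length_tail, List.length_cons] at *
            omega
          have h1 := ih rest.tail (d + 1) hlen (by omega)
          have hlen2 : (skipBracedB f rest.tail).2.length ≤ f :=
            le_trans (skipBracedB_len f rest.tail) hlen
          have h2 := ih (skipBracedB f rest.tail).2 d hlen2 hd
          rw [h1]
          have : d + 1 - 1 = d := by omega
          rw [this, h2]
          simp
        · -- plain char inside the region: copied verbatim by both
          rw [markGlobsA, skipBracedB]
          simp only [if_neg hdl, if_neg hbr]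
          have h1 : ¬ (c = '}' ∧ d > 0) := by intro ⟨h, _⟩; exact hbr h
          have h2 : ¬ (d = 0 ∧ (c = '*' ∨ c = '?' ∨ c = '[')) := by
            intro ⟨h, _⟩; omega
          simp only [if_neg h1, if_neg h2]
          have hlen : rest.length ≤ f := by simp only [List.length_cons] at hl; omega
          rw [ih rest d hlen hd]
          simp

theorem markGlobs_eq : ∀ (l : List Char), markGlobsA l 0 = markGlobsB l := by
  intro l
  induction l using markGlobsB.induct with
  | case1 => simp [markGlobsA, markGlobsB]
  | case2 c rest hdl p ih =>
    rw [markGlobsA, markGlobsB]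
    simp only [if_pos hdl]
    have hskip := markGlobsA_skip rest.tail.length rest.tail 1 le_rfl le_rfl
    simp only [show (1 : Int) - 1 = 0 from rfl] at hskip
    rw [show (0 : Int) + 1 = 1 from rfl, hskip, ih]
  | case3 c rest hdl hglob ih =>
    rw [markGlobsA, markGlobsB]
    have h1 : ¬ (c = '}' ∧ (0 : Int) > 0) := by intro ⟨_, h⟩; omega
    simp only [if_neg hdl, if_neg h1, true_and, if_pos hglob, ih]
  | case4 c rest hdl hglob ih =>
    rw [markGlobsA, markGlobsB]
    have h1 : ¬ (c = '}' ∧ (0 : Int) > 0) := by intro ⟨_, h⟩; omega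
    have h2 : ¬ ((0 : Int) = 0 ∧ (c = '*' ∨ c = '?' ∨ c = '[')) := by
      intro ⟨_, h⟩; exact hglob h
    simp only [if_neg hdl, if_neg h1, true_and, if_neg hglob, ih]

-- ===== VERDICT (by name: the statement is the Claim_ definition above) =====
theorem mark_quoted_globs_py_spec : Claim_equal_mark_quoted_globs_py := by
  intro value _
  unfold Spec_mark_quoted_globs_py mark_quoted_globs_py mark_quoted_globs_py_alt
  rw [markGlobs_eq]
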